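-- pv_equiv track=rewrite | github.com/adlemon/notes | programming/python/interview_questions/bit_operations/sevenish_numbers.py | sevenish_number_bits
-- ===== SOURCE A (Python) =====
-- def sevenish_number_bits(n):
--     # Let the binary representation of n be
--     #   b0 * 2^0 + b1 * 2^1 + ... + bk * 2^k.
--     # The nth sevenish number is
--     #   b0 * 7^0 + b1 * 7^1 + ... + bk * 7^k.
--     s = 0
--     power_of_seven = 1
--     while n > 0:
--         if (n & 1) == 1:
--             s += power_of_seven
--         n >>= 1
--         power_of_seven *= 7
--
--     return s
-- ===== SOURCE B (Python) =====
-- def sevenish_number_bits(n):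
--     # MSB-first Horner evaluation: reinterpret n's binary digits in base 7.
--     if n <= 0:
--         return 0
--     s = 0
--     for i in reversed(range(n.bit_length())):
--         s = s * 7 + ((n >> i) & 1)
--     return s
-- ===== Notes on version B (the rewrite author's own statement) =====
-- stated objective: alternative
-- what changed: Replaces A's LSB-first while-loop with a power-of-seven accumulator by an MSB-first Horner evaluation over the bit positions given by bit_length, with no power accumulator and a guard for non-positive inputs matching A's skipped loop.
import Mathlib
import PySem

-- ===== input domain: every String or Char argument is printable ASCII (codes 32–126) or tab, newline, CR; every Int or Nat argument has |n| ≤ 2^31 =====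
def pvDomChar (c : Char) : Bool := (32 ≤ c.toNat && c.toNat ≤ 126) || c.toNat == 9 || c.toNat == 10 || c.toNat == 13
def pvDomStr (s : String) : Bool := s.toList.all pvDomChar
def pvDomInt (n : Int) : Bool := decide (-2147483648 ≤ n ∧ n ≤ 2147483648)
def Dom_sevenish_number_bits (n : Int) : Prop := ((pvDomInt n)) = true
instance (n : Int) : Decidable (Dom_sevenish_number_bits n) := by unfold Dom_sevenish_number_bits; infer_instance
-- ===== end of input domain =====

-- B replaces A's LSB-first shift loop (power-of-seven accumulator) by an MSB-first
-- Horner evaluation over the bit positions 0 .. n.bit_length()-1; same cost, different traversal.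


-- ===== PORT A =====
-- while n > 0: if (n & 1) == 1: s += power_of_seven; n >>= 1; power_of_seven *= 7
def pvALoop (n s p : Int) : Int :=
  if 0 < n then
    pvALoop (n >>> (1:Nat)) (if PySem.Int.band n 1 = 1 then s + p else s) (p * 7)
  else s
termination_by n.toNat
decreasing_by
  simp only [Int.shiftRight_eq_div_pow, pow_one]
  omega

def sevenish_number_bits (n : Int) : Int := pvALoop n 0 1

-- ===== PORT B =====
-- if n <= 0: return 0; for i in reversed(range(n.bit_length())): s = s * 7 + ((n >> i) & 1)
def sevenish_number_bits_alt (n : Int) : Int :=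
  if n ≤ 0 then 0
  else
    (List.range (PySem.Int.bitLength n)).reverse.foldl
      (fun (s : Int) (i : Nat) => s * 7 + PySem.Int.band (n >>> i) 1) 0

-- ===== PRECONDITION & SPEC =====
def Spec_sevenish_number_bits (n : Int) (out : Int) : Prop := out = sevenish_number_bits_alt n
instance (n : Int) (out : Int) : Decidable (Spec_sevenish_number_bits n out) := by unfold Spec_sevenish_number_bits; infer_instance

-- ===== CLAIM (what is proved, stated in full; the proofs are below) =====
def Claim_equal_sevenish_number_bits : Prop := ∀ (n : Int), Dom_sevenish_number_bits n → Spec_sevenish_number_bits n (sevenish_number_bits n)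

-- ===== LEMMAS AND PROOFS =====

-- the common value: W n = Σ bit_i(n) * 7^i, as a halving recursion
def pvW (n : Int) : Int := if 0 < n then 7 * pvW (n / 2) + n % 2 else 0
termination_by n.toNat
decreasing_by omega

-- the same value as an explicit bit sum up to position k
def pvT (k : Nat) (n : Int) : Int :=
  ((List.range k).map (fun (i : Nat) => PySem.Int.band (n >>> i) 1 * 7 ^ i)).sum

theorem pv_band_one_eq (n : Int) : PySem.Int.band n 1 = n % 2 := by
  rw [PySem.Int.band_one]
  simp [PySem.Int.mod, Int.fmod_eq_emod]

theorem pv_shiftRight_one (n : Int) : n >>> (1:Nat) = n / 2 := by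
  simp [Int.shiftRight_eq_div_pow]

theorem pv_shiftRight_succ (n : Int) (i : Nat) : n >>> (i + 1) = (n / 2) >>> i := by
  simp only [Int.shiftRight_eq_div_pow]
  rw [pow_succ, Nat.cast_mul, mul_comm,
    ← Int.ediv_ediv_of_nonneg (by norm_num : (0:Int) ≤ ((2:Nat):Int))]
  norm_num

theorem pvALoop_eq : ∀ (k : Nat) (n s p : Int), n.toNat = k → pvALoop n s p = s + p * pvW n := by
  intro k
  induction k using Nat.strong_induction_on with
  | _ k ih =>
    intro n s p hk
    rw [pvALoop.eq_def, pvW.eq_def]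
    by_cases h : 0 < n
    · rw [if_pos h, if_pos h, pv_shiftRight_one n,
        ih (n / 2).toNat (by omega) (n / 2) _ _ rfl]
      simp only [pv_band_one_eq]
      rcases (by omega : n % 2 = 0 ∨ n % 2 = 1) with h2 | h2
      · simp only [h2]
        norm_num
        ring
      · simp only [h2]
        norm_num
        ring
    · rw [if_neg h, if_neg h]
      ring

theorem pvT_succ_shift (n : Int) (k : Nat) :
    pvT (k + 1) n = n % 2 + 7 * pvT k (n / 2) := by
  unfold pvT
  rw [List.range_succ_eq_map]
  simp only [List.map_cons, List.map_map, List.sum_cons, Int.shiftRight_zero, pow_zero, mul_one,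
    pv_band_one_eq]
  congr 1
  rw [← List.sum_map_mul_left]
  congr 1
  refine List.map_congr_left fun i _ => ?_
  simp only [Function.comp_apply, Nat.succ_eq_add_one, pv_shiftRight_succ, pow_succ]
  ring

theorem pv_foldl_horner (n : Int) : ∀ (k : Nat) (s : Int),
    (List.range k).reverse.foldl (fun (s : Int) (i : Nat) => s * 7 + PySem.Int.band (n >>> i) 1) s
      = s * 7 ^ k + pvT k n := by
  intro k
  induction k with
  | zero => intro s; simp [pvT]
  | succ k ih =>
    intro s
    rw [List.range_succ, List.reverse_append]
    simp only [List.reverse_cons, List.reverse_nil, List.nil_append, List.cons_append,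
      List.foldl_cons, List.nil_append]
    rw [ih]
    unfold pvT
    rw [List.range_succ, List.map_append, List.sum_append]
    simp only [List.map_cons, List.map_nil, List.sum_cons, List.sum_nil]
    ring

theorem pvW_eq_T : ∀ (k : Nat) (n : Int), n.toNat = k → 0 ≤ n →
    pvW n = pvT (PySem.Int.bitLength n) n := by
  intro k
  induction k using Nat.strong_induction_on with
  | _ k ih =>
    intro n hk hn
    by_cases h : 0 < n
    · rw [pvW.eq_def, if_pos h, PySem.Int.bitLength_of_pos h,
        PySem.Int.floordiv_eq_ediv_of_pos (by norm_num : (0:Int) < 2),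
        ih (n / 2).toNat (by omega) (n / 2) rfl (by omega), pvT_succ_shift]
      ring
    · have hn0 : n = 0 := by omega
      subst hn0
      rw [pvW]
      simp [pvT, PySem.Int.bitLength_zero]

-- ===== VERDICT (by name: the statement is the Claim_ definition above) =====
theorem sevenish_number_bits_spec : Claim_equal_sevenish_number_bits := by
  intro n _
  unfold Spec_sevenish_number_bits sevenish_number_bits sevenish_number_bits_alt
  rw [pvALoop_eq n.toNat n 0 1 rfl]
  split_ifs with h
  · rw [pvW.eq_def]
    simp [show ¬ 0 < n by omega]
  · rw [pv_foldl_horner, pvW_eq_T n.toNat n rfl (by omega)]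
    ring
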